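-- pv_equiv track=rewrite | github.com/Ohalo-Ltd/ohalo-playbooks | databricks-unity-dxr-integration/scripts/run_pipeline.py | _parse_job_parameters
-- ===== SOURCE A (Python) =====
-- from typing import Dict, Iterable
--
-- def _parse_job_parameters(argv: list[str]) -> Dict[str, str]:
--     """Read Databricks job parameter conventions into env overrides."""
--     overrides: Dict[str, str] = {}
--     pending_key: str | None = None
--
--     for token in argv:
--         if pending_key is None:
--             if token.startswith("--"):
--                 pending_key = token[2:]
--             elif "=" in token:
--                 key, value = token.split("=", 1)
--                 overrides[key.strip()] = value
--             else:
--                 pending_key = token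
--         else:
--             overrides[pending_key.strip()] = token
--             pending_key = None
--
--     if pending_key is not None:
--         raise ValueError(f"Missing value for parameter '{pending_key}'.")
--
--     normalized = {key.strip("- ").upper(): value for key, value in overrides.items() if key}
--     return normalized
-- ===== SOURCE B (Python) =====
-- from typing import Dict, List, Tuple
--
--
-- def _pairs(tokens: list[str]) -> List[Tuple[str, str]]:
--     """Recursively parse the token list into raw (key, value) pairs."""
--     if not tokens:
--         return []
--     head = tokens[0]
--     if not head.startswith("--") and "=" in head:
--         key, value = head.split("=", 1)
--         return [(key.strip(), value)] + _pairs(tokens[1:])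
--     key = head[2:] if head.startswith("--") else head
--     if len(tokens) < 2:
--         raise ValueError(f"Missing value for parameter '{key}'.")
--     return [(key.strip(), tokens[1])] + _pairs(tokens[2:])
--
--
-- def _parse_job_parameters(argv: list[str]) -> Dict[str, str]:
--     """Read Databricks job parameter conventions into env overrides."""
--     overrides = dict(_pairs(argv))
--     return {key.strip("- ").upper(): value for key, value in overrides.items() if key}
-- ===== Notes on version B (the rewrite author's own statement) =====
-- stated objective: alternative
-- what changed: Replaces A's single stateful for-loop (pending_key flag mutated across iterations while a dict is updated in place) with staged passes: a pure recursive parser that turns argv into a flat list of (key, value) pairs, then dict(pairs), then the normalization comprehension.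
import Mathlib
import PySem

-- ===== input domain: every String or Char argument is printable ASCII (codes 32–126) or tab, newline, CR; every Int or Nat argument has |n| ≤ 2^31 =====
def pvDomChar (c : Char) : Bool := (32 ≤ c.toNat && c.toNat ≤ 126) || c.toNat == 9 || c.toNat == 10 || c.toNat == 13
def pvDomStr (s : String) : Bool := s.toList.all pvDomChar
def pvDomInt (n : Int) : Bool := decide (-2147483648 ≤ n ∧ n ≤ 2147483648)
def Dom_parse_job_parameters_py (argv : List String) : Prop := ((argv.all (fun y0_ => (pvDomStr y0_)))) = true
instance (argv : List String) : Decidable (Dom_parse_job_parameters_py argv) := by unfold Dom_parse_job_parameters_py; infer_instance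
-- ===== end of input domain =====

-- B replaces A's stateful flag-carrying loop by staged passes: a pure recursive parser to a
-- flat (key, value) pair list, then dict(pairs), then normalization (objective: alternative).

-- ===== PORT A =====
-- shared final dict comprehension, identical line in both Pythons:
-- {key.strip("- ").upper(): value for key, value in overrides.items() if key}
def pvNormalize (d : PySem.Dict String String) : PySem.Dict String String :=
  d.items.foldl
    (fun acc kv =>
      if kv.1 ≠ "" then acc.insert (PySem.Str.upper (PySem.Str.stripChars kv.1 "- ")) kv.2
      else acc)
    PySem.Dict.empty

-- one iteration of A's for-loop over (overrides, pending_key)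
def pvAStep (st : PySem.Dict String String × Option String) (token : String) :
    PySem.Dict String String × Option String :=
  match st with
  | (ov, none) =>
      if PySem.Str.startswith token "--" then
        (ov, some (PySem.Str.slice token (some 2) none))
      else if PySem.Str.isIn "=" token then
        -- token.split("=", 1): "=" ∈ token guarantees exactly two parts (getD defaults unreachable)
        let parts := (PySem.Str.splitMax? token "=" 1).getD []
        (ov.insert (PySem.Str.strip (parts.getD 0 "")) (parts.getD 1 ""), none)
      else
        (ov, some token)
  | (ov, some k) => (ov.insert (PySem.Str.strip k) token, none)

-- on pending_key ≠ None after the loop, Python A raises ValueError (excluded by Pre_)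
def parse_job_parameters_py (argv : List String) : List (String × String) :=
  (pvNormalize (argv.foldl pvAStep (PySem.Dict.empty, none)).1).items

-- ===== PORT B =====
-- Source B's recursive helper _pairs: argv → flat list of raw (key, value) pairs
def pvPairs : List String → List (String × String)
  | [] => []
  | t :: rest =>
      if !(PySem.Str.startswith t "--") && PySem.Str.isIn "=" t then
        let parts := (PySem.Str.splitMax? t "=" 1).getD []
        (PySem.Str.strip (parts.getD 0 ""), parts.getD 1 "") :: pvPairs rest
      else
        let key := if PySem.Str.startswith t "--" then PySem.Str.slice t (some 2) none else t
        match rest with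
        | [] => []  -- Python B raises ValueError here (no value token); excluded by Pre_
        | v :: rest' => (PySem.Str.strip key, v) :: pvPairs rest'

-- dict(pairs): insertion with in-place overwrite, then the shared normalization
def parse_job_parameters_py_alt (argv : List String) : List (String × String) :=
  (pvNormalize ((pvPairs argv).foldl (fun d kv => d.insert kv.1 kv.2) PySem.Dict.empty)).items

-- ===== PRECONDITION & SPEC =====
-- Pre_ excludes exactly the inputs on which Python A raises ValueError (a key-shaped token with
-- no following value token; B raises the same error there): every key-shaped token is followed
-- by a value token.
def pvWfArgs : List String → Bool
  | [] => true
  | t :: rest =>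
      if PySem.Str.startswith t "--" || !(PySem.Str.isIn "=" t) then
        match rest with
        | [] => false
        | _ :: rest' => pvWfArgs rest'
      else pvWfArgs rest

def Pre_parse_job_parameters_py (argv : List String) : Prop := pvWfArgs argv = true
instance (argv : List String) : Decidable (Pre_parse_job_parameters_py argv) := by
  unfold Pre_parse_job_parameters_py; infer_instance

def pvWitness_parse_job_parameters_py : List String := ["--env", "prod", "name=x", "region", "eu"]

def Spec_parse_job_parameters_py (argv : List String) (out : List (String × String)) : Prop :=
  out = parse_job_parameters_py_alt argv
instance (argv : List String) (out : List (String × String)) :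
    Decidable (Spec_parse_job_parameters_py argv out) := by
  unfold Spec_parse_job_parameters_py; infer_instance

-- ===== CLAIM (what is proved, stated in full; the proofs are below) =====
def Claim_equal_parse_job_parameters_py : Prop :=
  ∀ (argv : List String), Dom_parse_job_parameters_py argv →
    Pre_parse_job_parameters_py argv →
      Spec_parse_job_parameters_py argv (parse_job_parameters_py argv)

-- ===== LEMMAS AND PROOFS =====
-- A's stateful loop computes the same overrides dict as folding B's pair list into a dict
-- (A's pending key is consumed one step later)
theorem pv_loop_eq : (l : List String) → (acc : PySem.Dict String String) →
    (List.foldl pvAStep (acc, none) l).1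
      = (pvPairs l).foldl (fun d kv => d.insert kv.1 kv.2) acc
  | [], acc => by simp [pvPairs]
  | [t], acc => by
      by_cases hs : PySem.Chars.startswith t.toList ['-', '-'] = true <;>
        by_cases hi : PySem.Chars.isIn ['='] t.toList = true <;>
          simp [pvPairs, pvAStep, hs, hi]
  | t :: v :: rest', acc => by
      by_cases hs : PySem.Chars.startswith t.toList ['-', '-'] = true
      · have h1 := pv_loop_eq rest'
          (acc.insert (PySem.Str.strip (PySem.Str.slice t (some 2) none)) v)
        simp [pvPairs, pvAStep, hs, h1]
      · by_cases hi : PySem.Chars.isIn ['='] t.toList = true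
        · have h1 := pv_loop_eq (v :: rest')
            (acc.insert (PySem.Str.strip (((PySem.Str.splitMax? t "=" 1).getD []).getD 0 ""))
              (((PySem.Str.splitMax? t "=" 1).getD []).getD 1 ""))
          simp only [List.foldl] at h1 ⊢
          simp [pvPairs, pvAStep, hs, hi] at h1 ⊢
          exact h1
        · have h1 := pv_loop_eq rest' (acc.insert (PySem.Str.strip t) v)
          simp [pvPairs, pvAStep, hs, hi, h1]
termination_by l => l.length

-- ===== VERDICT (by name: the statement is the Claim_ definition above) =====
theorem parse_job_parameters_py_spec : Claim_equal_parse_job_parameters_py := by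
  intro argv _ _
  unfold Spec_parse_job_parameters_py parse_job_parameters_py parse_job_parameters_py_alt
  rw [pv_loop_eq]
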